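-- pv_equiv track=rewrite | github.com/Velogan-Boy/dsa-grind | 4219-MinimumOperationsToMakeArrayParityAlternating/4219-MinimumOperationsToMakeArrayParityAlternating.py | makeParityAlternating
-- ===== SOURCE A (Python) =====
-- from typing import List
-- from collections import defaultdict
--
-- def makeParityAlternating(nums: List[int]) -> List[int]:
--     n = len(nums)
--
--     def solve(start_even: bool):
--         allowed = []
--         ops = 0
--
--         for i in range(n):
--             expected_even = (i % 2 == 0) if start_even else (i % 2 == 1)
--             if (nums[i] % 2 == 0) == expected_even:
--                 allowed.append([nums[i]])
--             else:
--                 ops += 1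
--                 allowed.append([nums[i] - 1, nums[i] + 1])
--
--         values = []
--         for i in range(n):
--             for v in allowed[i]:
--                 values.append((v, i))
--
--         values.sort()
--
--         count = defaultdict(int)
--         covered = 0
--         left = 0
--         best = float('inf')
--
--         for right in range(len(values)):
--             v, idx = values[right]
--             count[idx] += 1
--             if count[idx] == 1:
--                 covered += 1
--
--             while covered == n:
--                 best = min(best, values[right][0] - values[left][0])
--                 count[values[left][1]] -= 1
--                 if count[values[left][1]] == 0:
--                     covered -= 1
--                 left += 1
--
--         return ops, best
--
--     op1, diff1 = solve(True)
--     op2, diff2 = solve(False)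
--
--     if op1 < op2:
--         return [op1, diff1]
--     elif op2 < op1:
--         return [op2, diff2]
--     else:
--         return [op1, min(diff1, diff2)]
-- ===== SOURCE B (Python) =====
-- def makeParityAlternating(nums):
--     n = len(nums)
--
--     def solve(start_even):
--         allowed = []
--         ops = 0
--         for i, x in enumerate(nums):
--             if (x % 2 == 0) == ((i % 2 == 0) if start_even else (i % 2 == 1)):
--                 allowed.append([x])
--             else:
--                 ops += 1
--                 allowed.append([x - 1, x + 1])
--
--         values = sorted((v, i) for i in range(n) for v in allowed[i])
--
--         # single forward pass: keep each position's most recent candidate; once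
--         # every position has one, the window ending here is v - min(last values)
--         last = {}
--         best = float('inf')
--         for v, i in values:
--             last[i] = v
--             if len(last) == n:
--                 best = min(best, v - min(last.values()))
--         return ops, best
--
--     op1, diff1 = solve(True)
--     op2, diff2 = solve(False)
--
--     if op1 < op2:
--         return [op1, diff1]
--     elif op2 < op1:
--         return [op2, diff2]
--     else:
--         return [op1, min(diff1, diff2)]
-- ===== Notes on version B (the rewrite author's own statement) =====
-- stated objective: alternative
-- what changed: The sort+sliding-window (count dict, covered counter, left pointer, inner while loop) minimum-range search is replaced by a single forward pass over the sorted candidates that keeps each position's most recent candidate in a dict and, once every position has one, takes value minus the minimum of those last-seen values; the ops/allowed loop is folded over enumerate and the candidate list is built by a comprehension.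
-- outside the precondition, e.g. on makeParityAlternating([]): A returns [0, inf], B returns [0, inf]
import Mathlib
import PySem

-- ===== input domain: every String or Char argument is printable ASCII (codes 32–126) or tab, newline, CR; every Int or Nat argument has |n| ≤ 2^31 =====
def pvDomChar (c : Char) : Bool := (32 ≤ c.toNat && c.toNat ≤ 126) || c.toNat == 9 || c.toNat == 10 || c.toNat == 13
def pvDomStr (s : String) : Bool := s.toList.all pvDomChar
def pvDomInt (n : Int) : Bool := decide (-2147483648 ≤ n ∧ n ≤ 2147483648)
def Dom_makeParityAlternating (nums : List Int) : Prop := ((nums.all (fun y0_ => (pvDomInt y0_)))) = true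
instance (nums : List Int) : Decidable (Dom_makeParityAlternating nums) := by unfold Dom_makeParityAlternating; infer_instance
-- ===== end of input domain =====

-- B replaces A's flatten+sort+sliding-window minimum-range search by a single forward pass over the
-- sorted candidates that keeps each position's most recent candidate in a dict (alternative algorithm,
-- same ops/tie-breaking); equal return value on every non-empty input.


-- ===== PORT A =====

-- Python's float('inf') best is modelled as `none : Option Int`; min(best, x) on it:
def pvMinO (b : Option Int) (x : Int) : Option Int :=
  match b with
  | none => some x
  | some y => some (min y x)

-- min(diff1, diff2), either possibly inf:
def pvMinOO (a b : Option Int) : Option Int :=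
  match a, b with
  | none, none => none
  | none, some y => some y
  | some x, none => some x
  | some x, some y => some (min x y)

-- the inner `while covered == n:` loop of A; state = (count, covered, left, best).
-- fuel = len(values) + 1 suffices: left grows by 1 each pass and the loop exits before left exceeds right.
def pvWhileA (values : List (Int × Int)) (n : Int) :
    Nat → (PySem.Dict Int Int × Int × Int × Option Int) → Int → (PySem.Dict Int Int × Int × Int × Option Int)
  | 0, st, _ => st
  | fuel + 1, (count, covered, left, best), right =>
    if covered == n then
      let lv := PySem.List.pyGetD values left (0, 0)    -- values[left] (in range whenever the loop runs)
      let rv := PySem.List.pyGetD values right (0, 0)   -- values[right]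
      let best := pvMinO best (rv.1 - lv.1)
      let count := count.modify lv.2 0 (· - 1)          -- defaultdict(int): count[...] -= 1
      let covered := if count.getD lv.2 0 == 0 then covered - 1 else covered
      pvWhileA values n fuel (count, covered, left + 1, best) right
    else (count, covered, left, best)

def pvAStep (vs : List (Int × Int)) (n : Int)
    (st : PySem.Dict Int Int × Int × Int × Option Int) (right : Int) :
    PySem.Dict Int Int × Int × Int × Option Int :=
  let p := PySem.List.pyGetD vs right (0, 0)
  let count := st.1.modify p.2 0 (· + 1)
  let covered := if count.getD p.2 0 == 1 then st.2.1 + 1 else st.2.1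
  pvWhileA vs n (vs.length + 1) (count, covered, st.2.2.1, st.2.2.2) right

def pvSolveA (nums : List Int) (startEven : Bool) : Int × Option Int :=
  let n : Int := PySem.List.len nums
  let st := (PySem.List.pyRange 0 n).foldl (fun (st : List (List Int) × Int) i =>
      let x := PySem.List.pyGetD nums i 0               -- nums[i], i ∈ range(n)
      let expectedEven := if startEven then PySem.Int.mod i 2 == 0 else PySem.Int.mod i 2 == 1
      if (PySem.Int.mod x 2 == 0) == expectedEven then (st.1 ++ [[x]], st.2)
      else (st.1 ++ [[x - 1, x + 1]], st.2 + 1)) ([], 0)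
  let allowed := st.1
  let ops := st.2
  let values0 := (PySem.List.pyRange 0 n).foldl (fun acc i =>
      (PySem.List.pyGetD allowed i []).foldl (fun acc v => acc ++ [(v, i)]) acc) []
  let values := PySem.List.sorted2 values0 (·.1) (·.2)  -- values.sort(): tuples, lexicographic
  let st2 := (PySem.List.pyRange 0 (PySem.List.len values)).foldl (pvAStep values n)
      (PySem.Dict.empty, 0, 0, none)
  (ops, st2.2.2.2)

-- best = float('inf') happens exactly on nums = []; Pre_ excludes it, so `.getD 0` below is never the
-- value actually claimed about.
def makeParityAlternating (nums : List Int) : List Int :=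
  let r1 := pvSolveA nums true
  let r2 := pvSolveA nums false
  if r1.1 < r2.1 then [r1.1, r1.2.getD 0]
  else if r2.1 < r1.1 then [r2.1, r2.2.getD 0]
  else [r1.1, (pvMinOO r1.2 r2.2).getD 0]

-- ===== PORT B =====

def pvBStep (n : Int) (st : PySem.Dict Int Int × Option Int) (vi : Int × Int) :
    PySem.Dict Int Int × Option Int :=
  let last := st.1.insert vi.2 vi.1
  if ((last.size : Int)) == n then
    match PySem.List.min? last.values (fun y => y) with
    | some m => (last, pvMinO st.2 (vi.1 - m))
    | none => (last, st.2)   -- unreachable: last is non-empty here (Python's min would raise on [])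
  else (last, st.2)

def pvSolveB (nums : List Int) (startEven : Bool) : Int × Option Int :=
  let n : Int := PySem.List.len nums
  let st := (PySem.List.enumerate nums).foldl (fun (st : List (List Int) × Int) ix =>
      if (PySem.Int.mod ix.2 2 == 0) ==
          (if startEven then PySem.Int.mod ix.1 2 == 0 else PySem.Int.mod ix.1 2 == 1) then
        (st.1 ++ [[ix.2]], st.2)
      else (st.1 ++ [[ix.2 - 1, ix.2 + 1]], st.2 + 1)) ([], 0)
  let allowed := st.1
  let ops := st.2
  -- sorted((v, i) for i in range(n) for v in allowed[i])
  let values := PySem.List.sorted2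
      ((PySem.List.pyRange 0 n).flatMap (fun i => (PySem.List.pyGetD allowed i []).map (fun v => (v, i))))
      (·.1) (·.2)
  -- single forward pass; last[i] = latest candidate of position i
  let st2 := values.foldl (pvBStep n) (PySem.Dict.empty, none)
  (ops, st2.2)

def makeParityAlternating_alt (nums : List Int) : List Int :=
  let r1 := pvSolveB nums true
  let r2 := pvSolveB nums false
  if r1.1 < r2.1 then [r1.1, r1.2.getD 0]
  else if r2.1 < r1.1 then [r2.1, r2.2.getD 0]
  else [r1.1, (pvMinOO r1.2 r2.2).getD 0]

-- ===== PRECONDITION & SPEC =====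
-- On nums = [] (the only excluded input) A returns [0, float('inf')] — a float, not a value of the
-- declared List[int] type; Pre_ excludes exactly that input.
def Pre_makeParityAlternating (nums : List Int) : Prop := nums ≠ []
instance (nums : List Int) : Decidable (Pre_makeParityAlternating nums) := by
  unfold Pre_makeParityAlternating; infer_instance

def pvWitness_makeParityAlternating : List Int := [2, 2, 4]

def Spec_makeParityAlternating (nums : List Int) (out : List Int) : Prop := out = makeParityAlternating_alt nums
instance (nums : List Int) (out : List Int) : Decidable (Spec_makeParityAlternating nums out) := by
  unfold Spec_makeParityAlternating; infer_instance

-- ===== CLAIM (what is proved, stated in full; the proofs are below) =====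
def Claim_equal_makeParityAlternating : Prop := ∀ (nums : List Int), Dom_makeParityAlternating nums → Pre_makeParityAlternating nums → Spec_makeParityAlternating nums (makeParityAlternating nums)

-- ===== LEMMAS AND PROOFS =====

lemma pvPairwise_insertBy {α : Type} (R : α → α → Prop) (before : α → α → Bool)
    (htr : ∀ a b c, R a b → R b c → R a c)
    (hpos : ∀ a b, before a b = true → R a b)
    (hneg : ∀ a b, before a b = false → R b a)
    (x : α) (ys : List α) (h : ys.Pairwise R) :
    (PySem.List.insertBy before x ys).Pairwise R := by
  induction ys with
  | nil => simp [PySem.List.insertBy]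
  | cons y ys ih =>
    rcases List.pairwise_cons.mp h with ⟨hy, hys⟩
    by_cases hb : before x y = true
    · simp only [PySem.List.insertBy, hb, if_true]
      refine List.pairwise_cons.mpr ⟨?_, h⟩
      intro z hz
      rcases List.mem_cons.mp hz with rfl | hz
      · exact hpos _ _ hb
      · exact htr _ _ _ (hpos _ _ hb) (hy _ hz)
    · simp only [PySem.List.insertBy, hb]
      refine List.pairwise_cons.mpr ⟨?_, ih hys⟩
      intro z hz
      rcases (PySem.List.mem_insertBy _ _ _ _).mp hz with rfl | hz
      · exact hneg _ _ (by simpa using hb)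
      · exact hy _ hz

lemma pvSorted2_pairwise (xs : List (Int × Int)) :
    (PySem.List.sorted2 xs (·.1) (·.2)).Pairwise (fun a b => a.1 ≤ b.1) := by
  unfold PySem.List.sorted2
  simp only [if_neg (by simp : ¬ (false = true))]
  generalize hinit : ([] : List (Int × Int)) = init
  have h0 : init.Pairwise (fun a b : Int × Int => a.1 ≤ b.1) := by subst hinit; simp
  clear hinit
  induction xs generalizing init with
  | nil => simpa using h0
  | cons x xs ih =>
    simp only [List.foldl_cons]
    refine ih _ ?_
    refine pvPairwise_insertBy (fun a b : Int × Int => a.1 ≤ b.1) _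
      (fun a b c hab hbc => le_trans hab hbc) ?_ ?_ x init h0
    · intro a b hb
      simp only [Bool.or_eq_true, Bool.and_eq_true, decide_eq_true_eq, Bool.not_eq_true',
        decide_eq_false_iff_not] at hb
      rcases hb with h | ⟨h, _⟩
      · exact le_of_lt h
      · omega
    · intro a b hb
      simp only [Bool.or_eq_false_iff, decide_eq_false_iff_not] at hb
      exact le_of_not_gt hb.1

def pvAt (vs : List (Int × Int)) (i : Nat) : Int × Int := vs.getD i (0, 0)

lemma pvMono (vs : List (Int × Int)) (hsort : vs.Pairwise (fun a b => a.1 ≤ b.1))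
    {a b : Nat} (hab : a ≤ b) (hb : b < vs.length) :
    (pvAt vs a).1 ≤ (pvAt vs b).1 := by
  unfold pvAt
  rcases eq_or_lt_of_le hab with rfl | hlt
  · exact le_refl _
  · rw [List.getD_eq_getElem vs _ (lt_of_le_of_lt hab hb), List.getD_eq_getElem vs _ hb]
    exact (List.pairwise_iff_getElem.mp hsort) a b _ hb hlt

def pvLastD (p : List (Int × Int)) : PySem.Dict Int Int :=
  p.foldl (fun d vi => d.insert vi.2 vi.1) PySem.Dict.empty

lemma pvLastD_append (p : List (Int × Int)) (e : Int × Int) :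
    pvLastD (p ++ [e]) = (pvLastD p).insert e.2 e.1 := by
  simp [pvLastD]

lemma pvLastD_keys (p : List (Int × Int)) :
    (pvLastD p).keys = PySem.Set.ofList (p.map Prod.snd) := by
  unfold pvLastD
  rw [PySem.Dict.keys_foldl_insert_key p (fun vi => vi.2) (fun _ vi => vi.1) PySem.Dict.empty]
  rw [show (PySem.Dict.empty : PySem.Dict Int Int).keys = PySem.Set.empty from rfl]
  rw [PySem.Set.update_empty]

lemma pvLastD_nodup (p : List (Int × Int)) : (pvLastD p).keys.Nodup := by
  unfold pvLastD
  exact PySem.Dict.nodup_keys_foldl_insert_key p _ _ _ (by simp [PySem.Dict.empty, PySem.Dict.keys])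

lemma pvSetLen (xs : List Int) : (PySem.Set.ofList xs).length = xs.toFinset.card := by
  rw [← PySem.List.dedup_eq_ofList]
  have h1 : (PySem.List.dedup xs).toFinset = xs.toFinset := by
    ext a; simp
  rw [← List.toFinset_card_of_nodup (PySem.List.nodup_dedup xs), h1]

lemma pvSize_eq_keys_length (d : PySem.Dict Int Int) : d.size = d.keys.length := by
  simp [PySem.Dict.size, PySem.Dict.keys]

lemma pvLastD_size (p : List (Int × Int)) :
    (pvLastD p).size = (p.map Prod.snd).toFinset.card := by
  rw [pvSize_eq_keys_length, pvLastD_keys, pvSetLen]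

lemma pvMem_values_iff (d : PySem.Dict Int Int) (hn : d.keys.Nodup) (y : Int) :
    y ∈ d.values ↔ ∃ j, d.get? j = some y := by
  constructor
  · intro hy
    have : ∃ pr ∈ d.items, pr.2 = y := by
      simpa [PySem.Dict.values] using hy
    rcases this with ⟨⟨j, v⟩, hpr, rfl⟩
    exact ⟨j, PySem.Dict.get?_of_mem_items d hpr hn⟩
  · rintro ⟨j, hj⟩
    have : (j, y) ∈ d.items := (PySem.Dict.get?_eq_some_iff_mem_items d j y hn).mp hj
    simp only [PySem.Dict.values]
    exact List.mem_map.mpr ⟨(j, y), this, rfl⟩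

lemma pvLastD_get?_eq_some_iff (p : List (Int × Int)) (j y : Int) :
    (pvLastD p).get? j = some y ↔
      ∃ q, ∃ hq : q < p.length, p[q] = (y, j) ∧
        ∀ r, (hr : r < p.length) → q < r → (p[r]).2 ≠ j := by
  induction p using List.reverseRecOn with
  | nil => simp [pvLastD, PySem.Dict.get?_empty]
  | append_singleton l e ih =>
    rw [pvLastD_append, PySem.Dict.get?_insert]
    by_cases hj : j = e.2
    · subst hj
      simp only [if_true, Option.some_inj]
      constructor
      · rintro rfl
        refine ⟨l.length, by simp, ?_, ?_⟩
        · simp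
        · intro r hr hlt
          simp at hr; omega
      · rintro ⟨q, hq, heq, hlast⟩
        have hql : q = l.length := by
          by_contra hne
          have hq' : q < l.length := by simp at hq; omega
          exact hlast l.length (by simp) (by omega) (by simp)
        subst hql
        have : e = (y, e.2) := by simpa using heq
        exact congrArg Prod.fst this
    · rw [if_neg hj, ih]
      constructor
      · rintro ⟨q, hq, heq, hlast⟩
        refine ⟨q, (by simp; omega : q < (l ++ [e]).length), ?_, ?_⟩
        · rw [List.getElem_append_left hq]; exact heq
        · intro r hr hlt
          by_cases hrl : r < l.length
          · rw [List.getElem_append_left hrl]; exact hlast r hrl hlt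
          · have : r = l.length := by simp at hr; omega
            subst this
            rw [List.getElem_append_right (le_refl _)]
            simpa using fun h => hj h.symm
      · rintro ⟨q, hq, heq, hlast⟩
        have hql : q < l.length := by
          by_contra hne
          have : q = l.length := by simp at hq; omega
          subst this
          rw [List.getElem_append_right (le_refl _)] at heq
          have h2 := congrArg Prod.snd heq
          simp at h2
          exact hj h2.symm
        refine ⟨q, hql, ?_, ?_⟩
        · rw [List.getElem_append_left hql] at heq; exact heq
        · intro r hr hlt
          have := hlast r (by simp; omega) hlt
          rwa [List.getElem_append_left hr] at this

-- B's dict of latest candidates, and B's inner loop body (identical to the lambda in pvSolveB)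
def pvBFold (n : Int) (p : List (Int × Int)) : PySem.Dict Int Int × Option Int :=
  p.foldl (pvBStep n) (PySem.Dict.empty, none)

-- distinct-index count of the window of vs from position l to k (exclusive)
def pvDC (vs : List (Int × Int)) (k l : Nat) : Nat :=
  (((vs.take k).drop l).map Prod.snd).toFinset.card

-- the invariant tying A's sliding-window state after k outer steps to B's pass
structure PVInv (vs : List (Int × Int)) (n : Int) (k : Nat)
    (st : PySem.Dict Int Int × Int × Int × Option Int) : Prop where
  h0 : 0 ≤ st.2.2.1
  hub : st.2.2.1.toNat ≤ k
  hcount : ∀ j : Int, st.1.getD j 0 = (((vs.take k).drop st.2.2.1.toNat).map Prod.snd).count j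
  hcov : st.2.1 = (pvDC vs k st.2.2.1.toNat : Int)
  hne : st.2.1 ≠ n
  hfull : ∀ l : Nat, l < st.2.2.1.toNat → (pvDC vs k l : Int) = n
  hbest : st.2.2.2 = (pvBFold n (vs.take k)).2
  hprev : 1 ≤ st.2.2.1.toNat →
    ∃ b, st.2.2.2 = some b ∧
      b ≤ (pvAt vs (k - 1)).1 - (pvAt vs (st.2.2.1.toNat - 1)).1

-- the state mid-step (after the increment, before/while the inner loop runs)
structure PVMid (vs : List (Int × Int)) (n : Int) (k : Nat)
    (st : PySem.Dict Int Int × Int × Int × Option Int) : Prop where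
  h0 : 0 ≤ st.2.2.1
  hub : st.2.2.1.toNat ≤ k
  hcount : ∀ j : Int, st.1.getD j 0 = (((vs.take k).drop st.2.2.1.toNat).map Prod.snd).count j
  hcov : st.2.1 = (pvDC vs k st.2.2.1.toNat : Int)
  hfull : ∀ l : Nat, l < st.2.2.1.toNat → (pvDC vs k l : Int) = n

lemma pvMinO_le (o : Option Int) (x : Int) : ∃ b, pvMinO o x = some b ∧ b ≤ x := by
  cases o with
  | none => exact ⟨x, rfl, le_refl x⟩
  | some y => exact ⟨min y x, rfl, min_le_right y x⟩

lemma pvMinO_absorb (o : Option Int) (x y : Int) (h : y ≤ x) :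
    pvMinO (pvMinO o x) y = pvMinO o y := by
  cases o <;> simp [pvMinO] <;> omega

lemma pvMinO_id (o : Option Int) (b x : Int) (h : o = some b) (hx : b ≤ x) :
    pvMinO o x = o := by
  subst h; simp [pvMinO]; omega

lemma pvWindow_sublist (vs : List (Int × Int)) (k l : Nat) :
    ((vs.take k).drop l).Sublist vs :=
  ((vs.take k).drop_sublist l).trans (vs.take_sublist k)

lemma pvDC_le_total (vs : List (Int × Int)) (k l : Nat) :
    pvDC vs k l ≤ (vs.map Prod.snd).toFinset.card := by
  apply Finset.card_le_card
  intro a ha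
  simp only [List.mem_toFinset] at ha ⊢
  exact (List.Sublist.map Prod.snd (pvWindow_sublist vs k l)).subset ha

lemma pvDC_mono_l (vs : List (Int × Int)) (k : Nat) {l l' : Nat} (h : l ≤ l') :
    pvDC vs k l' ≤ pvDC vs k l := by
  apply Finset.card_le_card
  intro a ha
  simp only [List.mem_toFinset] at ha ⊢
  have h2 : ((vs.take k).drop l).drop (l' - l) = (vs.take k).drop l' := by
    rw [List.drop_drop]; congr 1; omega
  have hsub : ((vs.take k).drop l').Sublist ((vs.take k).drop l) := by
    rw [← h2]; exact List.drop_sublist _ _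
  exact (hsub.map Prod.snd).subset ha

lemma pvDC_mono_k (vs : List (Int × Int)) {k k' : Nat} (l : Nat) (h : k ≤ k') :
    pvDC vs k l ≤ pvDC vs k' l := by
  apply Finset.card_le_card
  intro a ha
  simp only [List.mem_toFinset] at ha ⊢
  have htk : (vs.take k').take k = vs.take k := by rw [List.take_take]; congr 1; omega
  have hr : vs.take k ++ (vs.take k').drop k = vs.take k' := by
    rw [← htk]; exact List.take_append_drop k (vs.take k')
  set r := (vs.take k').drop k with hrdef
  by_cases hl : l ≤ (vs.take k).length
  · have : (vs.take k').drop l = (vs.take k).drop l ++ r := by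
      rw [← hr, List.drop_append_of_le_length hl]
    rw [this] at *
    simp only [List.map_append, List.mem_append] at *
    exact Or.inl ha
  · have : (vs.take k).drop l = [] := by
      apply List.drop_eq_nil_of_le; omega
    rw [this] at ha; simp at ha

lemma pvWindow_cons (vs : List (Int × Int)) {k l : Nat} (hk : k ≤ vs.length) (hl : l < k) :
    (vs.take k).drop l = pvAt vs l :: (vs.take k).drop (l + 1) := by
  unfold pvAt
  have hlen : (vs.take k).length = k := by simp; omega
  have hl' : l < (vs.take k).length := by omega
  rw [List.drop_eq_getElem_cons hl']
  congr 1
  rw [List.getElem_take, List.getD_eq_getElem vs _ (by omega)]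

lemma pvWhile_spec (vs : List (Int × Int)) (n : Int) (hn : 1 ≤ n)
    (hsort : vs.Pairwise (fun a b => a.1 ≤ b.1))
    (k : Nat) (hk : k < vs.length) :
    ∀ (fuel : Nat) (st : PySem.Dict Int Int × Int × Int × Option Int),
      PVMid vs n (k + 1) st → k + 1 - st.2.2.1.toNat ≤ fuel →
      PVMid vs n (k + 1) (pvWhileA vs n fuel st (k : Int)) ∧
      (pvWhileA vs n fuel st (k : Int)).2.1 ≠ n ∧
      st.2.2.1.toNat ≤ (pvWhileA vs n fuel st (k : Int)).2.2.1.toNat ∧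
      (if st.2.1 = n then
         1 ≤ (pvWhileA vs n fuel st (k : Int)).2.2.1.toNat ∧
         (pvWhileA vs n fuel st (k : Int)).2.2.2 =
           pvMinO st.2.2.2
             ((pvAt vs k).1 - (pvAt vs ((pvWhileA vs n fuel st (k : Int)).2.2.1.toNat - 1)).1) ∧
         (((vs.take (k+1)).drop (pvWhileA vs n fuel st (k : Int)).2.2.1.toNat).map Prod.snd).count
             ((pvAt vs ((pvWhileA vs n fuel st (k : Int)).2.2.1.toNat - 1)).2) = 0
       else pvWhileA vs n fuel st (k : Int) = st) := by
  intro fuel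
  induction fuel with
  | zero =>
    intro st hmid hfuel
    have hl : st.2.2.1.toNat = k + 1 := by have := hmid.hub; omega
    have hwin : (vs.take (k+1)).drop st.2.2.1.toNat = [] := by
      apply List.drop_eq_nil_of_le; simp [hl]
    have hcov0 : st.2.1 = 0 := by rw [hmid.hcov, hl]; rw [hl] at hwin; simp [pvDC, hwin]
    have hne : st.2.1 ≠ n := by omega
    have hid : pvWhileA vs n 0 st (k : Int) = st := rfl
    rw [hid]
    exact ⟨hmid, hne, le_refl _, by rw [if_neg (by omega)]⟩
  | succ fuel ih =>
    intro st hmid hfuel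
    obtain ⟨count, covered, left, best⟩ := st
    have hfuel' : k + 1 - left.toNat ≤ fuel + 1 := hfuel
    have h0l : 0 ≤ left := hmid.h0
    have hub : left.toNat ≤ k + 1 := hmid.hub
    have hcovEq : covered = (pvDC vs (k+1) left.toNat : Int) := hmid.hcov
    by_cases hc : covered = n
    · -- one pass of the while loop, then recurse
      -- the window is non-empty: left < k+1
      have hlw : left.toNat < k + 1 := by
        by_contra hcon
        have hwin : (vs.take (k+1)).drop left.toNat = [] := by
          apply List.drop_eq_nil_of_le; simp; omega
        rw [hcovEq] at hc
        simp [pvDC, hwin] at hc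
        omega
      have hlv : PySem.List.pyGetD vs left (0,0) = pvAt vs left.toNat := by
        unfold pvAt
        rw [PySem.List.pyGetD_eq_getElem vs (0,0) h0l (by omega),
          List.getD_eq_getElem vs _ (by omega)]
      have hrv : PySem.List.pyGetD vs (k : Int) (0,0) = pvAt vs k := by
        unfold pvAt
        exact PySem.List.pyGetD_natCast vs k (0,0)
      have hstep : pvWhileA vs n (fuel+1) (count, covered, left, best) (k : Int) =
          pvWhileA vs n fuel
            (count.modify (pvAt vs left.toNat).2 0 (· - 1),
             (if (count.modify (pvAt vs left.toNat).2 0 (· - 1)).getD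
                  (pvAt vs left.toNat).2 0 == 0 then covered - 1 else covered),
             left + 1,
             pvMinO best ((pvAt vs k).1 - (pvAt vs left.toNat).1)) (k : Int) := by
        conv_lhs => rw [pvWhileA]
        rw [if_pos (by simp [hc])]
        rw [hlv, hrv]
      have hwc : (vs.take (k+1)).drop left.toNat =
          pvAt vs left.toNat :: (vs.take (k+1)).drop (left.toNat + 1) :=
        pvWindow_cons vs (by omega) hlw
      -- abbreviations
      have hcnt : ∀ j : Int,
          (count.modify (pvAt vs left.toNat).2 0 (· - 1)).getD j 0 =
            (((vs.take (k+1)).drop (left.toNat + 1)).map Prod.snd).count j := by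
        intro j
        rw [PySem.Dict.getD_modify]
        have hc0 := hmid.hcount j
        have hcl := hmid.hcount (pvAt vs left.toNat).2
        by_cases hj : j = (pvAt vs left.toNat).2
        · rw [if_pos hj, hcl]
          rw [show ((vs.take (k+1)).drop left.toNat) =
            pvAt vs left.toNat :: (vs.take (k+1)).drop (left.toNat + 1) from hwc]
          subst hj
          simp [List.count_cons]
        · rw [if_neg hj, hc0]
          rw [show ((vs.take (k+1)).drop left.toNat) =
            pvAt vs left.toNat :: (vs.take (k+1)).drop (left.toNat + 1) from hwc]
          simp [List.count_cons, beq_iff_eq]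
          exact fun h => hj h.symm
      have hsetc : ((vs.take (k+1)).drop left.toNat).map Prod.snd =
          (pvAt vs left.toNat).2 :: ((vs.take (k+1)).drop (left.toNat + 1)).map Prod.snd := by
        rw [hwc]; simp
      have hcov1 : (if (count.modify (pvAt vs left.toNat).2 0 (· - 1)).getD
            (pvAt vs left.toNat).2 0 == 0 then covered - 1 else covered) =
          (pvDC vs (k+1) (left.toNat + 1) : Int) := by
        rw [hcnt]
        have hdc : pvDC vs (k+1) left.toNat =
            (insert (pvAt vs left.toNat).2
              (((vs.take (k+1)).drop (left.toNat + 1)).map Prod.snd).toFinset).card := by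
          unfold pvDC; rw [hsetc]; simp
        by_cases h0 : (((vs.take (k+1)).drop (left.toNat + 1)).map Prod.snd).count
            (pvAt vs left.toNat).2 = 0
        · have hnm : (pvAt vs left.toNat).2 ∉
              ((vs.take (k+1)).drop (left.toNat + 1)).map Prod.snd :=
            List.count_eq_zero.mp h0
          rw [if_pos (by simp only [beq_iff_eq]; exact_mod_cast h0), hcovEq, hdc]
          rw [Finset.card_insert_of_notMem (by simpa using hnm)]
          simp only [pvDC]
          push_cast
          omega
        · have hm : (pvAt vs left.toNat).2 ∈
              ((vs.take (k+1)).drop (left.toNat + 1)).map Prod.snd := by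
            by_contra hcon; exact h0 (List.count_eq_zero.mpr hcon)
          rw [if_neg (by simpa using h0), hcovEq, hdc]
          rw [Finset.insert_eq_self.mpr (by simpa using hm)]
          simp only [pvDC]
      have hmid1 : PVMid vs n (k + 1)
          (count.modify (pvAt vs left.toNat).2 0 (· - 1),
           (if (count.modify (pvAt vs left.toNat).2 0 (· - 1)).getD
                (pvAt vs left.toNat).2 0 == 0 then covered - 1 else covered),
           left + 1,
           pvMinO best ((pvAt vs k).1 - (pvAt vs left.toNat).1)) := by
        refine ⟨by dsimp only; omega, by dsimp only; omega, ?_, ?_, ?_⟩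
        · intro j
          have := hcnt j
          dsimp only
          simpa [show (left + 1).toNat = left.toNat + 1 by omega] using this
        · dsimp only
          simpa [show (left + 1).toNat = left.toNat + 1 by omega] using hcov1
        · intro l hl
          dsimp only at hl
          simp only [show (left + 1).toNat = left.toNat + 1 by omega] at hl
          rcases Nat.lt_or_ge l left.toNat with h | h
          · exact hmid.hfull l h
          · have : l = left.toNat := by omega
            subst this
            rw [← hcovEq, hc]
      have ihr := ih _ hmid1 (by show k + 1 - (left + 1).toNat ≤ fuel; omega)
      obtain ⟨hm2, hne2, hmono2, hif2⟩ := ihr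
      rw [hstep]
      have hmono2'' : (left + 1).toNat ≤ (pvWhileA vs n fuel (count.modify (pvAt vs left.toNat).2 0 (· - 1),
          (if (count.modify (pvAt vs left.toNat).2 0 (· - 1)).getD
               (pvAt vs left.toNat).2 0 == 0 then covered - 1 else covered),
          left + 1,
          pvMinO best ((pvAt vs k).1 - (pvAt vs left.toNat).1)) (k : Int)).2.2.1.toNat := hmono2
      refine ⟨hm2, hne2, le_trans (by omega : left.toNat ≤ (left + 1).toNat) hmono2'', ?_⟩
      rw [if_pos hc]
      have hmono2' : (left + 1).toNat ≤ (pvWhileA vs n fuel (count.modify (pvAt vs left.toNat).2 0 (· - 1),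
          (if (count.modify (pvAt vs left.toNat).2 0 (· - 1)).getD
               (pvAt vs left.toNat).2 0 == 0 then covered - 1 else covered),
          left + 1,
          pvMinO best ((pvAt vs k).1 - (pvAt vs left.toNat).1)) (k : Int)).2.2.1.toNat := hmono2
      refine ⟨by omega, ?_, ?_⟩
      · -- the best-value formula
        by_cases hc1 : (if (count.modify (pvAt vs left.toNat).2 0 (· - 1)).getD
              (pvAt vs left.toNat).2 0 == 0 then covered - 1 else covered) = n
        · rw [if_pos hc1] at hif2
          obtain ⟨h1, h2, h3⟩ := hif2
          rw [h2]
          apply pvMinO_absorb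
          have hmono : (pvAt vs left.toNat).1 ≤
              (pvAt vs ((pvWhileA vs n fuel (count.modify (pvAt vs left.toNat).2 0 (· - 1),
          (if (count.modify (pvAt vs left.toNat).2 0 (· - 1)).getD
               (pvAt vs left.toNat).2 0 == 0 then covered - 1 else covered),
          left + 1,
          pvMinO best ((pvAt vs k).1 - (pvAt vs left.toNat).1)) (k : Int)).2.2.1.toNat - 1)).1 := by
            apply pvMono vs hsort (by omega)
            have := hm2.hub; omega
          exact sub_le_sub_left hmono _
        · rw [if_neg hc1] at hif2
          rw [hif2]
          simp only [show (left + 1).toNat = left.toNat + 1 by omega, Nat.add_sub_cancel]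
      · -- the popped index does not occur in the final window
        by_cases hc1 : (if (count.modify (pvAt vs left.toNat).2 0 (· - 1)).getD
              (pvAt vs left.toNat).2 0 == 0 then covered - 1 else covered) = n
        · rw [if_pos hc1] at hif2
          exact hif2.2.2
        · rw [if_neg hc1] at hif2
          rw [hif2]
          simp only [show (left + 1).toNat = left.toNat + 1 by omega, Nat.add_sub_cancel]
          -- covered₁ ≠ n forces the count to have hit zero
          by_cases h0 : (count.modify (pvAt vs left.toNat).2 0 (· - 1)).getD
              (pvAt vs left.toNat).2 0 == 0
          · have h5 := hcnt (pvAt vs left.toNat).2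
            simp only [beq_iff_eq] at h0
            rw [h5] at h0
            exact_mod_cast h0
          · rw [if_neg h0] at hc1
            exact absurd hc hc1
    · have hstep : pvWhileA vs n (fuel+1) (count, covered, left, best) (k : Int) =
          (count, covered, left, best) := by
        conv_lhs => rw [pvWhileA]
        rw [if_neg (by simp [hc])]
      rw [hstep]
      exact ⟨hmid, hc, le_refl _, by rw [if_neg hc]⟩

lemma pvBStep_fst (n : Int) (st : PySem.Dict Int Int × Option Int) (x : Int × Int) :
    (pvBStep n st x).1 = st.1.insert x.2 x.1 := by
  unfold pvBStep
  by_cases h : ((((st.1.insert x.2 x.1).size : Int)) == n) = true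
  · simp only [h, if_true]
    cases hm : PySem.List.min? (st.1.insert x.2 x.1).values (fun y => y) <;> simp
  · simp only [Bool.not_eq_true] at h
    simp [h]

lemma pvBFold_fst (n : Int) (p : List (Int × Int)) : (pvBFold n p).1 = pvLastD p := by
  unfold pvBFold pvLastD
  suffices h : ∀ (d : PySem.Dict Int Int) (b : Option Int),
      (p.foldl (pvBStep n) (d, b)).1 = p.foldl (fun d vi => d.insert vi.2 vi.1) d by
    exact h _ _
  induction p with
  | nil => intro d b; rfl
  | cons x p ih =>
    intro d b
    simp only [List.foldl_cons]
    have h1 : pvBStep n (d, b) x = ((d.insert x.2 x.1), (pvBStep n (d, b) x).2) := by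
      have := pvBStep_fst n (d, b) x
      exact Prod.ext this rfl
    rw [h1, ih]

lemma pvAt_take (vs : List (Int × Int)) {m q : Nat} (hq : q < m)
    (h' : q < (vs.take m).length) : (vs.take m)[q] = pvAt vs q := by
  rw [List.getElem_take]
  unfold pvAt
  rw [List.getD_eq_getElem vs _ (by simp at h'; omega)]

lemma pvLastD_take_get? (vs : List (Int × Int)) (k : Nat) (hk1 : k + 1 ≤ vs.length) (j y : Int) :
    (pvLastD (vs.take (k+1))).get? j = some y ↔
      ∃ q, q < k + 1 ∧ pvAt vs q = (y, j) ∧ ∀ r, r < k + 1 → q < r → (pvAt vs r).2 ≠ j := by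
  rw [pvLastD_get?_eq_some_iff]
  have hlen : (vs.take (k+1)).length = k + 1 := by simp; omega
  constructor
  · rintro ⟨q, hq, heq, hlast⟩
    refine ⟨q, by omega, ?_, ?_⟩
    · rw [← pvAt_take vs (m := k+1) (by omega) hq]; exact heq
    · intro r hr hqr
      have := hlast r (by omega) hqr
      rwa [pvAt_take vs (m := k+1) (by omega) (by omega)] at this
  · rintro ⟨q, hq, heq, hlast⟩
    refine ⟨q, by omega, ?_, ?_⟩
    · rw [pvAt_take vs (m := k+1) (by omega) (by omega)]; exact heq
    · intro r hr hqr
      have := hlast r (by omega) hqr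
      rwa [← pvAt_take vs (m := k+1) (by omega) (by omega)] at this

lemma pvValues_char (vs : List (Int × Int)) (k : Nat) (hk1 : k + 1 ≤ vs.length) (y : Int) :
    y ∈ (pvLastD (vs.take (k+1))).values ↔
      ∃ q, q < k + 1 ∧ (pvAt vs q).1 = y ∧
        ∀ r, r < k + 1 → q < r → (pvAt vs r).2 ≠ (pvAt vs q).2 := by
  rw [pvMem_values_iff _ (pvLastD_nodup _)]
  constructor
  · rintro ⟨j, hj⟩
    rcases (pvLastD_take_get? vs k hk1 j y).mp hj with ⟨q, hq, heq, hlast⟩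
    refine ⟨q, hq, congrArg Prod.fst heq, ?_⟩
    intro r hr hqr
    rw [show (pvAt vs q).2 = j from congrArg Prod.snd heq]
    exact hlast r hr hqr
  · rintro ⟨q, hq, h1, hlast⟩
    refine ⟨(pvAt vs q).2, (pvLastD_take_get? vs k hk1 _ y).mpr ⟨q, hq, ?_, hlast⟩⟩
    rw [← h1]

-- the element of the drop-window at absolute position r
lemma pvMem_drop_map_snd (vs : List (Int × Int)) (k L r : Nat) (hk1 : k + 1 ≤ vs.length)
    (hr : r < k + 1) (hLr : L ≤ r) :
    (pvAt vs r).2 ∈ ((vs.take (k+1)).drop L).map Prod.snd := by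
  have hlen : (vs.take (k+1)).length = k + 1 := by simp; omega
  have hidx : r - L < ((vs.take (k+1)).drop L).length := by simp [hlen]; omega
  have : ((vs.take (k+1)).drop L)[r - L] = pvAt vs r := by
    rw [List.getElem_drop, pvAt_take vs (m := k+1) (by omega) (by omega)]
    congr 1
    omega
  exact List.mem_map.mpr ⟨pvAt vs r, by rw [← this]; exact List.getElem_mem hidx, rfl⟩

lemma pvMem_total_map_snd (vs : List (Int × Int)) (k q : Nat) (hk1 : k + 1 ≤ vs.length)
    (hq : q < k + 1) :
    (pvAt vs q).2 ∈ (vs.take (k+1)).map Prod.snd := by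
  have := pvMem_drop_map_snd vs k 0 q hk1 hq (Nat.zero_le q)
  simpa using this

lemma pvMinLast_eq (vs : List (Int × Int)) (n : Int)
    (hsub : (((vs.map Prod.snd).toFinset.card : Nat) : Int) ≤ n)
    (hsort : vs.Pairwise (fun a b => a.1 ≤ b.1))
    (k : Nat) (hk : k < vs.length) (R : Nat) (hR1 : 1 ≤ R) (hR : R ≤ k + 1)
    (hcover : ((pvDC vs (k+1) (R-1) : Nat) : Int) = n)
    (hzero : (((vs.take (k+1)).drop R).map Prod.snd).count ((pvAt vs (R-1)).2) = 0) :
    PySem.List.min? (pvLastD (vs.take (k+1))).values (fun y => y) = some ((pvAt vs (R-1)).1) := by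
  have hk1 : k + 1 ≤ vs.length := by omega
  -- (a) the value at R-1 is a value of the dict: R-1 is the last occurrence of its index
  have hmem : (pvAt vs (R-1)).1 ∈ (pvLastD (vs.take (k+1))).values := by
    rw [pvValues_char vs k hk1]
    refine ⟨R-1, by omega, rfl, ?_⟩
    intro r hr hqr
    intro hcon
    have hmem2 : (pvAt vs r).2 ∈ ((vs.take (k+1)).drop R).map Prod.snd :=
      pvMem_drop_map_snd vs k R r hk1 hr (by omega)
    rw [hcon] at hmem2
    exact (List.count_eq_zero.mp hzero) hmem2
  -- (b) every value of the dict is ≥ the value at R-1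
  have hminv : ∀ y ∈ (pvLastD (vs.take (k+1))).values, (pvAt vs (R-1)).1 ≤ y := by
    intro y hy
    rcases (pvValues_char vs k hk1 y).mp hy with ⟨q, hq, h1, hlast⟩
    -- the window from R-1 carries every index of the whole prefix
    have hseteq : (((vs.take (k+1)).drop (R-1)).map Prod.snd).toFinset =
        ((vs.take (k+1)).map Prod.snd).toFinset := by
      apply Finset.eq_of_subset_of_card_le
      · intro a ha
        simp only [List.mem_toFinset] at ha ⊢
        exact (((vs.take (k+1)).drop_sublist (R-1)).map Prod.snd).subset ha
      · have h2 : ((vs.take (k+1)).map Prod.snd).toFinset.card ≤ (vs.map Prod.snd).toFinset.card := by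
          apply Finset.card_le_card
          intro a ha
          simp only [List.mem_toFinset] at ha ⊢
          exact ((vs.take_sublist (k+1)).map Prod.snd).subset ha
        have h3 := hcover
        unfold pvDC at h3
        omega
    have hjin : (pvAt vs q).2 ∈ (((vs.take (k+1)).drop (R-1)).map Prod.snd).toFinset := by
      rw [hseteq]
      simp only [List.mem_toFinset]
      exact pvMem_total_map_snd vs k q hk1 hq
    -- so the index of q occurs somewhere at position ≥ R-1; its last occurrence is q, hence q ≥ R-1
    have hqR : R - 1 ≤ q := by
      simp only [List.mem_toFinset, List.mem_map] at hjin
      rcases hjin with ⟨e, he, hsnd⟩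
      rcases List.mem_iff_getElem.mp he with ⟨i, hi, hie⟩
      have hlen : (vs.take (k+1)).length = k + 1 := by simp; omega
      have hiw : i + (R-1) < k + 1 := by simp [hlen] at hi; omega
      have hel : ((vs.take (k+1)).drop (R-1))[i] = pvAt vs (i + (R-1)) := by
        rw [List.getElem_drop, pvAt_take vs (m := k+1) (by omega) (by omega)]
        congr 1
        omega
      rw [hel] at hie
      by_contra hcon
      have hql : q < i + (R-1) := by omega
      have := hlast (i + (R-1)) hiw hql
      rw [hie] at this
      exact this hsnd
    rw [← h1]
    exact pvMono vs hsort (by omega) (by omega)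
  -- combine
  cases hmin : PySem.List.min? (pvLastD (vs.take (k+1))).values (fun y => y) with
  | none =>
    rw [PySem.List.min?_eq_none_iff] at hmin
    rw [hmin] at hmem
    simp at hmem
  | some m0 =>
    have h1 : m0 ∈ (pvLastD (vs.take (k+1))).values := PySem.List.min?_mem hmin
    have h2 := PySem.List.min?_isMin hmin _ hmem
    have h3 := hminv m0 h1
    simp only [Option.some_inj]
    omega

lemma pvMinLast_le (vs : List (Int × Int))
    (hsort : vs.Pairwise (fun a b => a.1 ≤ b.1))
    (k : Nat) (hk : k < vs.length) (L : Nat) (hL1 : 1 ≤ L) (hL : L ≤ k + 1)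
    (j : Int) (hjin : j ∈ (vs.take (k+1)).map Prod.snd)
    (hjout : j ∉ ((vs.take (k+1)).drop L).map Prod.snd) :
    ∃ m0, PySem.List.min? (pvLastD (vs.take (k+1))).values (fun y => y) = some m0 ∧
      m0 ≤ (pvAt vs (L-1)).1 := by
  have hk1 : k + 1 ≤ vs.length := by omega
  -- j is a key of the dict, get its (last-occurrence) value
  have hkey : j ∈ (pvLastD (vs.take (k+1))).keys := by
    rw [pvLastD_keys, ← PySem.List.dedup_eq_ofList, PySem.List.mem_dedup]
    exact hjin
  have hget : ∃ y, (pvLastD (vs.take (k+1))).get? j = some y := by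
    cases hg : (pvLastD (vs.take (k+1))).get? j with
    | none =>
      rw [PySem.Dict.get?_eq_none_iff_not_mem_keys] at hg
      exact absurd hkey hg
    | some y => exact ⟨y, rfl⟩
  rcases hget with ⟨y, hy⟩
  rcases (pvLastD_take_get? vs k hk1 j y).mp hy with ⟨q, hq, heq, hlast⟩
  have hsnd : (pvAt vs q).2 = j := congrArg Prod.snd heq
  have hfst : (pvAt vs q).1 = y := congrArg Prod.fst heq
  -- all occurrences of j are before L
  have hqL : q < L := by
    by_contra hcon
    have := pvMem_drop_map_snd vs k L q hk1 hq (by omega)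
    rw [hsnd] at this
    exact hjout this
  have hyv : y ∈ (pvLastD (vs.take (k+1))).values :=
    (pvMem_values_iff _ (pvLastD_nodup _) y).mpr ⟨j, hy⟩
  cases hmin : PySem.List.min? (pvLastD (vs.take (k+1))).values (fun y => y) with
  | none =>
    rw [PySem.List.min?_eq_none_iff] at hmin
    rw [hmin] at hyv
    simp at hyv
  | some m0 =>
    refine ⟨m0, rfl, ?_⟩
    have h2 := PySem.List.min?_isMin hmin _ hyv
    have h3 : y ≤ (pvAt vs (L-1)).1 := by
      rw [← hfst]
      exact pvMono vs hsort (by omega) (by omega)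
    omega

lemma pvStep_spec (vs : List (Int × Int)) (n : Int) (hn : 1 ≤ n)
    (hsub : (((vs.map Prod.snd).toFinset.card : Nat) : Int) ≤ n)
    (hsort : vs.Pairwise (fun a b => a.1 ≤ b.1))
    (k : Nat) (hk : k < vs.length)
    (st : PySem.Dict Int Int × Int × Int × Option Int) (hinv : PVInv vs n k st) :
    PVInv vs n (k+1) (pvAStep vs n st (k : Int)) := by
  obtain ⟨count, covered, left, best⟩ := st
  have h0l : 0 ≤ left := hinv.h0
  have hub : left.toNat ≤ k := hinv.hub
  have hcnt0 : ∀ j : Int, count.getD j 0 =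
      (((vs.take k).drop left.toNat).map Prod.snd).count j := hinv.hcount
  have hcov0 : covered = (pvDC vs k left.toNat : Int) := hinv.hcov
  have hfull0 : ∀ l : Nat, l < left.toNat → (pvDC vs k l : Int) = n := hinv.hfull
  have hbest0 : best = (pvBFold n (vs.take k)).2 := hinv.hbest
  have hprev0 : 1 ≤ left.toNat → ∃ b, best = some b ∧
      b ≤ (pvAt vs (k - 1)).1 - (pvAt vs (left.toNat - 1)).1 := hinv.hprev
  have hp : PySem.List.pyGetD vs (k : Int) (0,0) = pvAt vs k := by
    unfold pvAt
    exact PySem.List.pyGetD_natCast vs k (0,0)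
  have hstep : pvAStep vs n (count, covered, left, best) (k : Int) =
      pvWhileA vs n (vs.length + 1)
        (count.modify (pvAt vs k).2 0 (· + 1),
         (if (count.modify (pvAt vs k).2 0 (· + 1)).getD (pvAt vs k).2 0 == 1
            then covered + 1 else covered),
         left, best) (k : Int) := by
    simp only [pvAStep]
    rw [hp]
  have htk : vs.take (k+1) = vs.take k ++ [pvAt vs k] := by
    rw [List.take_succ, List.getElem?_eq_getElem hk]
    simp only [Option.toList_some]
    congr 2
    unfold pvAt
    rw [List.getD_eq_getElem vs _ hk]
  have hwnd : ∀ l : Nat, l ≤ k → (vs.take (k+1)).drop l = (vs.take k).drop l ++ [pvAt vs k] := by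
    intro l hl
    rw [htk, List.drop_append_of_le_length (by simp; omega)]
  have hcm : ∀ j : Int, (count.modify (pvAt vs k).2 0 (· + 1)).getD j 0 =
      (((vs.take (k+1)).drop left.toNat).map Prod.snd).count j := by
    intro j
    rw [PySem.Dict.getD_modify, hwnd left.toNat hub]
    by_cases hj : j = (pvAt vs k).2
    · rw [if_pos hj, hcnt0 ((pvAt vs k).2)]
      subst hj
      simp [List.count_append]
    · rw [if_neg hj, hcnt0 j]
      simp only [List.map_append, List.count_append, List.map_cons, List.map_nil]
      have h1 : ([(pvAt vs k).2] : List Int).count j = 0 := by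
        simp [List.count_singleton]
        exact fun h => hj h.symm
      rw [h1]
      push_cast
      omega
  have hdm : pvDC vs (k+1) left.toNat =
      (insert (pvAt vs k).2 (((vs.take k).drop left.toNat).map Prod.snd).toFinset).card := by
    unfold pvDC
    rw [hwnd left.toNat hub]
    simp only [List.map_append, List.toFinset_append, List.map_cons, List.map_nil]
    rw [Finset.union_comm]
    congr 1
  have hcovm : (if (count.modify (pvAt vs k).2 0 (· + 1)).getD (pvAt vs k).2 0 == 1
      then covered + 1 else covered) = ((pvDC vs (k+1) left.toNat : Nat) : Int) := by
    rw [hcm ((pvAt vs k).2)]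
    have hc1 : (((vs.take (k+1)).drop left.toNat).map Prod.snd).count (pvAt vs k).2 =
        (((vs.take k).drop left.toNat).map Prod.snd).count (pvAt vs k).2 + 1 := by
      rw [hwnd left.toNat hub]
      simp [List.count_append]
    rw [hc1]
    by_cases hmem : (pvAt vs k).2 ∈ ((vs.take k).drop left.toNat).map Prod.snd
    · rw [if_neg (by
        simp only [beq_iff_eq]
        have hcp := List.count_pos_iff.mpr hmem
        intro hcon
        omega)]
      rw [hcov0, hdm, Finset.insert_eq_self.mpr (by simpa using hmem)]
      unfold pvDC
      rfl
    · rw [if_pos (by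
        simp only [beq_iff_eq]
        rw [List.count_eq_zero.mpr hmem]
        norm_num)]
      rw [hcov0, hdm, Finset.card_insert_of_notMem (by simpa using hmem)]
      unfold pvDC
      push_cast
      omega
  have hfullm : ∀ l : Nat, l < left.toNat → ((pvDC vs (k+1) l : Nat) : Int) = n := by
    intro l hl
    have h1 := hfull0 l hl
    have h2 := pvDC_mono_k vs (l := l) (show k ≤ k + 1 by omega)
    have h3 := pvDC_le_total vs (k+1) l
    omega
  set cnt1 := count.modify (pvAt vs k).2 0 (· + 1) with hcnt1def
  set cov1 := (if cnt1.getD (pvAt vs k).2 0 == 1 then covered + 1 else covered) with hcov1def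
  have hmidm : PVMid vs n (k+1) (cnt1, cov1, left, best) :=
    ⟨h0l, le_trans hub (Nat.le_succ k), hcm, hcovm, hfullm⟩
  have hws := pvWhile_spec vs n hn hsort k hk (vs.length + 1) _ hmidm
    (le_trans (Nat.sub_le (k+1) _) (Nat.succ_le_succ (le_of_lt hk)))
  obtain ⟨hm2, hne2, hmono2, hif2⟩ := hws
  set r := pvWhileA vs n (vs.length + 1) (cnt1, cov1, left, best) (k : Int) with hrdef
  rw [hstep]
  -- B's one step over the new element
  have hins : (pvBFold n (vs.take k)).1.insert (pvAt vs k).2 (pvAt vs k).1 =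
      pvLastD (vs.take (k+1)) := by
    rw [pvBFold_fst, htk, pvLastD_append]
  have hBval : (pvBFold n (vs.take (k+1))).2 =
      (if ((pvLastD (vs.take (k+1))).size : Int) = n then
        match PySem.List.min? (pvLastD (vs.take (k+1))).values (fun y => y) with
        | some m0 => pvMinO (pvBFold n (vs.take k)).2 ((pvAt vs k).1 - m0)
        | none => (pvBFold n (vs.take k)).2
      else (pvBFold n (vs.take k)).2) := by
    have happ : pvBFold n (vs.take (k+1)) = pvBStep n (pvBFold n (vs.take k)) (pvAt vs k) := by
      rw [htk]
      unfold pvBFold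
      rw [List.foldl_append]
      rfl
    rw [happ]
    simp only [pvBStep, hins]
    by_cases hcnd : ((pvLastD (vs.take (k+1))).size : Int) = n
    · rw [if_pos (by simpa using hcnd), if_pos hcnd]
      rcases hmm : PySem.List.min? (pvLastD (vs.take (k+1))).values (fun y => y) with _ | m0 <;>
        simp
    · rw [if_neg (by simpa using hcnd), if_neg hcnd]
  have hsize : ((pvLastD (vs.take (k+1))).size : Int) =
      (((vs.take (k+1)).map Prod.snd).toFinset.card : Int) := by
    rw [pvLastD_size]
  have hD0 : pvDC vs (k+1) 0 = ((vs.take (k+1)).map Prod.snd).toFinset.card := by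
    unfold pvDC
    rw [List.drop_zero]
  have hDsub : (((vs.take (k+1)).map Prod.snd).toFinset.card : Int) ≤ n := by
    have h2 : ((vs.take (k+1)).map Prod.snd).toFinset.card ≤ (vs.map Prod.snd).toFinset.card := by
      apply Finset.card_le_card
      intro a ha
      simp only [List.mem_toFinset] at ha ⊢
      exact ((vs.take_sublist (k+1)).map Prod.snd).subset ha
    omega
  by_cases hcA : cov1 = n
  · -- A's window covers: both sides take the minimum with the same candidate
    rw [if_pos hcA] at hif2
    have hcA' : ((pvDC vs (k+1) left.toNat : Nat) : Int) = n := hcovm.symm.trans hcA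
    have hdist : (((vs.take (k+1)).map Prod.snd).toFinset.card : Int) = n := by
      have h2 := pvDC_mono_l vs (k+1) (Nat.zero_le left.toNat)
      rw [hD0] at h2
      omega
    obtain ⟨hr1, hrbest, hrzero⟩ := hif2
    have hcover : ((pvDC vs (k+1) (r.2.2.1.toNat - 1) : Nat) : Int) = n :=
      hm2.hfull _ (Nat.sub_lt (lt_of_lt_of_le Nat.zero_lt_one hr1) Nat.zero_lt_one)
    have hminval := pvMinLast_eq vs n hsub hsort k hk _ hr1 hm2.hub hcover hrzero
    refine ⟨hm2.h0, hm2.hub, hm2.hcount, hm2.hcov, hne2, hm2.hfull, ?_, ?_⟩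
    · rw [hrbest, hBval, if_pos (hsize.trans hdist), hminval, ← hbest0]
    · intro h1
      rw [hrbest]
      rcases pvMinO_le best ((pvAt vs k).1 - (pvAt vs (r.2.2.1.toNat - 1)).1) with ⟨b, hb, hble⟩
      exact ⟨b, hb, by simpa using hble⟩
  · -- A does not update
    rw [if_neg hcA] at hif2
    have hcA' : ((pvDC vs (k+1) left.toNat : Nat) : Int) ≠ n := fun h => hcA (hcovm.trans h)
    by_cases hdist : (((vs.take (k+1)).map Prod.snd).toFinset.card : Int) = n
    · -- B updates, but with a candidate that cannot beat the recorded best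
      have hL1 : 1 ≤ left.toNat := by
        by_contra hcon
        have hl0 : left.toNat = 0 := Nat.lt_one_iff.mp (Nat.not_le.mp hcon)
        rw [hl0, hD0] at hcA'
        exact hcA' hdist
      have hlt : ((pvDC vs (k+1) left.toNat : Nat) : Int) < n := by
        have h2 := pvDC_mono_l vs (k+1) (Nat.zero_le left.toNat)
        rw [hD0] at h2
        omega
      have hex : ∃ j ∈ ((vs.take (k+1)).map Prod.snd).toFinset,
          j ∉ (((vs.take (k+1)).drop left.toNat).map Prod.snd).toFinset := by
        by_contra hcon
        push_neg at hcon
        have hss : ((vs.take (k+1)).map Prod.snd).toFinset ⊆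
            (((vs.take (k+1)).drop left.toNat).map Prod.snd).toFinset := fun x hx => hcon x hx
        have := Finset.card_le_card hss
        unfold pvDC at hlt
        omega
      rcases hex with ⟨j, hjin, hjout⟩
      rcases pvMinLast_le vs hsort k hk left.toNat hL1 (by omega) j
          (List.mem_toFinset.mp hjin) (fun h => hjout (List.mem_toFinset.mpr h)) with
        ⟨m0, hm0, hm0le⟩
      rcases hprev0 hL1 with ⟨b, hb, hble⟩
      have hk1 : 1 ≤ k := by omega
      have hmk : (pvAt vs (k-1)).1 ≤ (pvAt vs k).1 := pvMono vs hsort (by omega) hk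
      rw [hif2]
      refine ⟨h0l, le_trans hub (Nat.le_succ k), hcm, hcovm, ?_, hfullm, ?_, ?_⟩
    -- hne for the mid state:
      · exact fun h => hcA h
      · show best = (pvBFold n (vs.take (k+1))).2
        rw [hBval, if_pos (hsize.trans hdist), hm0, ← hbest0]
        show best = pvMinO best ((pvAt vs k).1 - m0)
        rw [pvMinO_id best b ((pvAt vs k).1 - m0) hb (by omega)]
      · intro h1
        refine ⟨b, hb, ?_⟩
        show b ≤ (pvAt vs (k + 1 - 1)).1 - (pvAt vs (left.toNat - 1)).1
        have h2 : (pvAt vs (k + 1 - 1)).1 = (pvAt vs k).1 := by norm_num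
        rw [h2]
        omega
    · -- neither side updates
      rw [hif2]
      refine ⟨h0l, le_trans hub (Nat.le_succ k), hcm, hcovm, ?_, hfullm, ?_, ?_⟩
      · exact fun h => hcA h
      · show best = (pvBFold n (vs.take (k+1))).2
        rw [hBval, if_neg (fun h => hdist (hsize.symm.trans h)), ← hbest0]
      · intro h1
        exfalso
        have h1' : 1 ≤ left.toNat := h1
        have h2 := hfullm 0 (by omega)
        rw [hD0] at h2
        exact hdist h2
lemma pvA_inv (vs : List (Int × Int)) (n : Int) (hn : 1 ≤ n)
    (hsub : (((vs.map Prod.snd).toFinset.card : Nat) : Int) ≤ n)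
    (hsort : vs.Pairwise (fun a b => a.1 ≤ b.1)) :
    ∀ k : Nat, k ≤ vs.length →
      PVInv vs n k ((PySem.List.pyRange 0 (k : Int)).foldl (pvAStep vs n)
        (PySem.Dict.empty, 0, 0, none)) := by
  intro k
  induction k with
  | zero =>
    intro _
    have hr0 : PySem.List.pyRange 0 ((0 : Nat) : Int) = [] :=
      PySem.List.pyRange_one_eq_nil (by norm_num)
    rw [hr0]
    simp only [List.foldl_nil]
    refine ⟨le_refl 0, Nat.le_refl _, ?_, ?_, (show (0:Int) ≠ n by omega), ?_, rfl, ?_⟩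
    · intro j
      simp [PySem.Dict.getD_empty]
    · simp [pvDC]
    · intro l hl
      exact absurd hl (Nat.not_lt_zero l)
    · intro h1
      exact absurd h1 (by norm_num)
  | succ k ih =>
    intro hk1
    have hk : k < vs.length := by omega
    have hr : PySem.List.pyRange 0 ((k+1 : Nat) : Int) =
        PySem.List.pyRange 0 (k : Int) ++ [(k : Int)] := by
      rw [show ((k+1 : Nat) : Int) = (k : Int) + 1 by push_cast; ring]
      exact PySem.List.pyRange_one_succ_right (by positivity)
    rw [hr, List.foldl_append]
    simp only [List.foldl_cons, List.foldl_nil]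
    exact pvStep_spec vs n hn hsub hsort k hk _ (ih (by omega))

lemma pvMain (vs : List (Int × Int)) (n : Int) (hn : 1 ≤ n)
    (hsub : (((vs.map Prod.snd).toFinset.card : Nat) : Int) ≤ n)
    (hsort : vs.Pairwise (fun a b => a.1 ≤ b.1)) :
    ((PySem.List.pyRange 0 (PySem.List.len vs)).foldl (pvAStep vs n)
      (PySem.Dict.empty, 0, 0, none)).2.2.2 =
    (vs.foldl (pvBStep n) (PySem.Dict.empty, none)).2 := by
  have hb := (pvA_inv vs n hn hsub hsort vs.length (le_refl _)).hbest
  rw [List.take_length] at hb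
  exact hb

lemma pvSub_bound (allowed : List (List Int)) (N : Int) (hN : 0 ≤ N) :
    (((((PySem.List.pyRange 0 N).flatMap
        (fun i => (PySem.List.pyGetD allowed i []).map (fun v => (v, i)))).map
          Prod.snd).toFinset.card : Nat) : Int) ≤ N := by
  have hss : ((((PySem.List.pyRange 0 N).flatMap
      (fun i => (PySem.List.pyGetD allowed i []).map (fun v => (v, i)))).map Prod.snd).toFinset : Finset Int) ⊆
      (PySem.List.pyRange 0 N).toFinset := by
    intro a ha
    simp only [List.mem_toFinset] at ha ⊢
    rcases List.mem_map.mp ha with ⟨p, hp, rfl⟩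
    rcases List.mem_flatMap.mp hp with ⟨i, hi, hmem⟩
    rcases List.mem_map.mp hmem with ⟨v, hv, rfl⟩
    exact hi
  have h1 := Finset.card_le_card hss
  have h2 := List.toFinset_card_le (PySem.List.pyRange 0 N)
  have h3 := PySem.List.length_pyRange_one 0 N
  have h4 : (PySem.List.pyRange 0 N).length = (N - 0).toNat := h3
  omega

lemma pvCard_sorted2 (xs : List (Int × Int)) :
    ((PySem.List.sorted2 xs (·.1) (·.2)).map Prod.snd).toFinset =
    (xs.map Prod.snd).toFinset :=
  List.toFinset_eq_of_perm _ _ ((PySem.List.sorted2_perm xs _ _ false).map Prod.snd)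

lemma pvSolve_eq (nums : List Int) (h : nums ≠ []) (startEven : Bool) :
    pvSolveA nums startEven = pvSolveB nums startEven := by
  have hlen : 1 ≤ nums.length := List.length_pos_of_ne_nil h
  simp only [pvSolveA, pvSolveB]
  rw [PySem.List.enumerate_eq_map_pyRange nums 0, List.foldl_map]
  beta_reduce
  simp only [PySem.List.foldl_append_singleton_eq_map]
  rw [PySem.List.foldl_append_eq_flatMap, List.nil_append]
  congr 1
  apply pvMain
  · show 1 ≤ PySem.List.len nums
    simp only [PySem.List.len]
    omega
  · rw [pvCard_sorted2]
    have hb := pvSub_bound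
      (((PySem.List.pyRange 0 (PySem.List.len nums)).foldl (fun (st : List (List Int) × Int) i =>
        if (PySem.Int.mod (PySem.List.pyGetD nums i 0) 2 == 0) ==
            (if startEven then PySem.Int.mod i 2 == 0 else PySem.Int.mod i 2 == 1)
        then (st.1 ++ [[PySem.List.pyGetD nums i 0]], st.2)
        else (st.1 ++ [[PySem.List.pyGetD nums i 0 - 1, PySem.List.pyGetD nums i 0 + 1]], st.2 + 1))
        ([], 0)).1) (PySem.List.len nums) (by simp only [PySem.List.len]; omega)
    exact hb
  · exact pvSorted2_pairwise _

theorem makeParityAlternating_spec : Claim_equal_makeParityAlternating := by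
  intro nums _ hpre
  unfold Spec_makeParityAlternating
  unfold makeParityAlternating makeParityAlternating_alt
  rw [pvSolve_eq nums hpre true, pvSolve_eq nums hpre false]
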